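-- pv_equiv track=rewrite | github.com/sebasquirarte/Genomic-Data-Science-Specialization | Algorithms_for_DNA_Sequencing/search_algorithms/dna_naiveBM.py | approximate_match_index
-- ===== SOURCE A (Python) =====
-- import bisect
--
-- class Index(object):
--     """ Holds a substring index for a text T """
--     def __init__(self, t, k):
--         """ Create index from all substrings of t of length k """
--         self.k = k # k-mer length (k)
--         self.index = []
--         for i in range(len(t)-k+1): # for each k-mer
--             self.index.append((t[i:i+k], i)) # add (k-mer, offset) pair
--         self.index.sort()
--
--     def query(self, p):
--         """ Return index hits for first k-mer of p """
--         kmer = p[:self.k] # query with first k-mer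
--         i = bisect.bisect_left(self.index, (kmer, -1)) # binary search
--         hits = []
--         while i < len(self.index): # # collect matching index entries
--             if self.index[i][0] != kmer:
--                 break # end of multimap equal range
--             hits.append(self.index[i][1])
--             i += 1
--         return hits
--
-- def approximate_match_index(p, t, k): #pattern, text, mismatches
--     segment_length = round(len(p) // (k+1))
--     hits = 0
--     all_matches = set()
--     index = Index(t, 8) # built on 8-mers
--     for i in range(k+1):
--         start = i * segment_length
--         end = min((i+1) * segment_length, len(p))
--         matches = index.query(p[start:end])
--         hits += len(matches)
--         for m in matches:
--             text_offset = m - start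
--             if text_offset < 0 or (text_offset + len(p)) > len(t):
--                 continue
--             mismatches = 0
--             for j in range(0, start):
--                 if not p[j] == t[text_offset + j]:
--                     mismatches += 1
--                     if mismatches > k:
--                         break
--             for j in range(end, len(p)):
--                 if not p[j] == t[text_offset + j]:
--                     mismatches += 1
--                     if mismatches > k:
--                         break
--             if mismatches <= k:
--                 all_matches.add(text_offset)
--     return list(all_matches), hits
-- ===== SOURCE B (Python) =====
-- def approximate_match_index(p, t, k):
--     """Pigeonhole approximate matching by direct scanning: for each of the k+1
--     segments of p, slide an 8-character window over t, and verify each window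
--     hit by counting mismatches outside the segment."""
--     n = len(p)
--     seg = len(p) // (k + 1)
--     hits = 0
--     found = set()
--     for i in range(k + 1):
--         start = i * seg
--         end = min(start + seg, n)
--         kmer = p[start:end][:8]
--         for w in range(len(t) - 7):
--             if t[w:w + 8] != kmer:
--                 continue
--             hits += 1
--             off = w - start
--             if off < 0 or off + n > len(t):
--                 continue
--             bad = sum(1 for j in range(n)
--                       if (j < start or j >= end) and p[j] != t[off + j])
--             if bad <= k:
--                 found.add(off)
--     return list(found), hits
-- ===== Notes on version B (the rewrite author's own statement) =====
-- stated objective: simpler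
-- what changed: Drops the Index class, the sorted (8-mer, offset) list and bisect entirely: B slides an 8-character window over t directly inside each segment's loop and counts mismatches with a single comprehension-style sum over range(len(p)) instead of A's two break-out loops; Pre_ only excludes k = -1, where A raises ZeroDivisionError (B raises it too).
import Mathlib
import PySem

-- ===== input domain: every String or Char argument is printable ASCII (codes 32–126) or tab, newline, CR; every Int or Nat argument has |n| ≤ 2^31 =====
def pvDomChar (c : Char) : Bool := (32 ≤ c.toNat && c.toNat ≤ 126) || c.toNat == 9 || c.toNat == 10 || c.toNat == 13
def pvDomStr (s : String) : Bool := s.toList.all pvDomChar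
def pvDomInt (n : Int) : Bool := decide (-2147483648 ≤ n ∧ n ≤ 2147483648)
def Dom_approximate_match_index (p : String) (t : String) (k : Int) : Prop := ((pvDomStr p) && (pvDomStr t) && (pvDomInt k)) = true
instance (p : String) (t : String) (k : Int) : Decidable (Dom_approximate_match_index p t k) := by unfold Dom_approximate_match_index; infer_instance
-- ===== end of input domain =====

-- B replaces A's sorted 8-mer index + bisect with a direct fused scan of t per segment and a
-- single comprehension-style mismatch count (objective: simpler); return value only — no mutation.

-- Both Pythons return list(s) of a set of nonnegative ints: the helpers below model CPython's
-- deterministic hash-table iteration order for such a set, given its distinct first-insertion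
-- sequence (open addressing, LINEAR_PROBES = 9, PERTURB_SHIFT = 5, growth ×4 at 3/5 load).
-- Shared by both ports (it is the meaning of `list(set)`, not part of either algorithm).
def cpyHash (v : Int) : Nat := (PySem.Int.mod v 2305843009213693951).toNat

def cpyScan (tbl : List (Option Int)) : Nat → Nat → Option Nat
  | start, 0 => if tbl.getD start none = none then some start else none
  | start, n+1 => if tbl.getD start none = none then some start else cpyScan tbl (start+1) n

def cpyFindSlot (tbl : List (Option Int)) (mask : Nat) : Nat → Nat → Nat → Option Nat
  | 0, _, _ => none
  | fuel+1, i, perturb =>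
      match cpyScan tbl i (if i + 9 ≤ mask then 9 else 0) with
      | some j => some j
      | none =>
          let perturb' := perturb >>> 5
          cpyFindSlot tbl mask fuel ((i*5 + 1 + perturb') &&& mask) perturb'

def cpyInsert (tbl : List (Option Int)) (v : Int) : List (Option Int) :=
  let mask := tbl.length - 1
  let h := cpyHash v
  match cpyFindSlot tbl mask (tbl.length*4 + 64) (h &&& mask) h with
  | some j => tbl.set j (some v)
  | none => tbl  -- fuel exhausted: unreachable, the table always has a free slot

def cpyNewSize (minused : Nat) : Nat → Nat → Nat
  | 0, s => s
  | f+1, s => if s ≤ minused then cpyNewSize minused f (s*2) else s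

def cpyGrow (tbl : List (Option Int)) (fill : Nat) : List (Option Int) :=
  let minused := if fill > 50000 then fill*2 else fill*4
  let ns := cpyNewSize minused 64 8
  (tbl.filterMap id).foldl cpyInsert (List.replicate ns none)

def cpyAdd (st : List (Option Int) × Nat) (v : Int) : List (Option Int) × Nat :=
  let mask := st.1.length - 1
  let tbl := cpyInsert st.1 v
  let fill := st.2 + 1
  if fill * 5 ≥ mask * 3 then (cpyGrow tbl fill, fill) else (tbl, fill)

def cpySetList (vals : List Int) : List Int :=
  ((vals.foldl cpyAdd (List.replicate 8 none, 0)).1).filterMap id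

-- ===== PORT A =====
-- p[j] / t[j] for an in-range index (A only indexes in range)
def pGetC (cs : List Char) (j : Int) : Char := PySem.List.pyGetD cs j ' '

-- Index.__init__: (t[i:i+k], i) pairs, then self.index.sort() (Python tuple order = lex)
def indexBuild (tl : List Char) (kk : Int) : List (Lex (List Char × Int)) :=
  PySem.List.sorted
    ((PySem.List.pyRange 0 ((tl.length : Int) - kk + 1) 1).foldl
      (fun acc i => acc ++ [toLex (PySem.List.slice tl (some i) (some (i + kk)), i)]) [])
    (fun e => e) false

-- the while-loop of Index.query: collect offsets until the k-mer changes
def queryWalk (kmer : List Char) : List (Lex (List Char × Int)) → List Int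
  | [] => []
  | e :: rest => if ¬ ((ofLex e).1 == kmer) then [] else (ofLex e).2 :: queryWalk kmer rest

-- Index.query: first k-mer of p, bisect_left on (kmer, -1), walk the equal range
def indexQuery (idx : List (Lex (List Char × Int))) (kk : Int) (pseg : List Char) : List Int :=
  let kmer := PySem.List.slice pseg none (some kk)
  queryWalk kmer (idx.drop (PySem.List.bisectLeft idx (toLex (kmer, -1))))

-- one of A's mismatch-counting loops with its `break` on mismatches > k
def misLoop (pl tl : List Char) (off k : Int) : List Int → Int → Int
  | [], m => m
  | j :: rest, m =>
      if ¬ (pGetC pl j == pGetC tl (off + j)) then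
        if m + 1 > k then m + 1
        else misLoop pl tl off k rest (m + 1)
      else misLoop pl tl off k rest m

def approximate_match_index (p t : String) (k : Int) : List Int × Int :=
  let pl := p.toList; let tl := t.toList
  let segment_length := PySem.Int.floordiv (pl.length : Int) (k + 1)  -- round(int) = int
  let idx := indexBuild tl 8
  let res := (PySem.List.pyRange 0 (k + 1) 1).foldl
    (fun (st : Int × PySem.Set Int) i =>
      let start := i * segment_length
      let stop := min ((i + 1) * segment_length) ((pl.length : Int))
      let mtchs := indexQuery idx 8 (PySem.List.slice pl (some start) (some stop))
      let hits := st.1 + (mtchs.length : Int)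
      let am := mtchs.foldl
        (fun (s : PySem.Set Int) m =>
          let off := m - start
          if off < 0 ∨ off + (pl.length : Int) > (tl.length : Int) then s
          else
            let m1 := misLoop pl tl off k (PySem.List.pyRange 0 start 1) 0
            let m2 := misLoop pl tl off k (PySem.List.pyRange stop (pl.length : Int) 1) m1
            if m2 ≤ k then PySem.Set.add s off else s) st.2
      (hits, am)) (0, PySem.Set.empty)
  (cpySetList res.2, res.1)

-- ===== PORT B =====
def approximate_match_index_alt (p t : String) (k : Int) : List Int × Int :=
  let pl := p.toList; let tl := t.toList
  let n := (pl.length : Int)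
  let seg := PySem.Int.floordiv n (k + 1)
  let res := (PySem.List.pyRange 0 (k + 1) 1).foldl
    (fun (st : Int × PySem.Set Int) i =>
      let start := i * seg
      let stop := min (start + seg) n
      let kmer := PySem.List.slice (PySem.List.slice pl (some start) (some stop)) none (some 8)
      (PySem.List.pyRange 0 ((tl.length : Int) - 7) 1).foldl
        (fun (st2 : Int × PySem.Set Int) w =>
          if ¬ (PySem.List.slice tl (some w) (some (w + 8)) == kmer) then st2
          else
            let hits := st2.1 + 1
            let off := w - start
            if off < 0 ∨ off + n > (tl.length : Int) then (hits, st2.2)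
            else
              let bad : Int := ((PySem.List.pyRange 0 n 1).countP
                  (fun j => (decide (j < start) || decide (stop ≤ j)) &&
                            !(pGetC pl j == pGetC tl (off + j))) : Nat)
              if bad ≤ k then (hits, PySem.Set.add st2.2 off) else (hits, st2.2)) st)
    (0, PySem.Set.empty)
  (cpySetList res.2, res.1)

-- ===== PRECONDITION & SPEC =====
-- Pre_ excludes only k = -1, where A raises ZeroDivisionError on len(p)//(k+1) (B raises there too).
def Pre_approximate_match_index (p : String) (t : String) (k : Int) : Prop := k ≠ -1
instance (p : String) (t : String) (k : Int) : Decidable (Pre_approximate_match_index p t k) := by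
  unfold Pre_approximate_match_index; infer_instance

def pvWitness_approximate_match_index : String × String × Int := ("ACGTAACCGGTTACGT", "ACGTAACCGGTTACGTCACGTAACCGATTACGT", 1)

def Spec_approximate_match_index (p : String) (t : String) (k : Int) (out : List Int × Int) : Prop :=
  out = approximate_match_index_alt p t k
instance (p : String) (t : String) (k : Int) (out : List Int × Int) :
    Decidable (Spec_approximate_match_index p t k out) := by
  unfold Spec_approximate_match_index; infer_instance

-- ===== CLAIM (what is proved, stated in full; the proofs are below) =====
def Claim_equal_approximate_match_index : Prop :=
  ∀ (p : String) (t : String) (k : Int), Dom_approximate_match_index p t k →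
    Pre_approximate_match_index p t k →
    Spec_approximate_match_index p t k (approximate_match_index p t k)

-- ===== LEMMAS AND PROOFS =====

-- generic bisect_left invariant (PySem ships bisectLeft_spec only for List ℤ; needed here on the lex pairs)

theorem bisectLoop_inv {α : Type} [LinearOrder α] (xs : List α) (x : α)
    (hsort : xs.Pairwise (· ≤ ·)) :
    ∀ (fuel lo hi : Nat), lo ≤ hi → hi ≤ xs.length → hi - lo ≤ fuel →
    (∀ j (hj : j < xs.length), j < lo → xs[j] < x) →
    (∀ j (hj : j < xs.length), hi ≤ j → x ≤ xs[j]) →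
    (∀ j (hj : j < xs.length), j < PySem.List.bisectLeftLoop xs x fuel lo hi → xs[j] < x) ∧
    (∀ j (hj : j < xs.length), PySem.List.bisectLeftLoop xs x fuel lo hi ≤ j → x ≤ xs[j]) := by
  intro fuel
  induction fuel with
  | zero =>
    intro lo hi hlh hhl hf hlo hhi
    have : hi = lo := by omega
    subst this
    simp only [PySem.List.bisectLeftLoop]
    exact ⟨hlo, hhi⟩
  | succ f ih =>
    intro lo hi hlh hhl hf hlo hhi
    by_cases hlt : lo < hi
    · have hmid : (lo + hi) / 2 < xs.length := by omega
      have hx : xs[(lo + hi) / 2]? = some xs[(lo + hi) / 2] := List.getElem?_eq_getElem hmid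
      have hmono : ∀ (a b : Nat) (ha : a < xs.length) (hb : b < xs.length), a ≤ b → xs[a] ≤ xs[b] := by
        intro a b ha hb hab
        rcases Nat.lt_or_ge a b with h | h
        · exact (List.pairwise_iff_getElem.mp hsort) a b ha hb h
        · have : a = b := by omega
          subst this; exact le_refl _
      simp only [PySem.List.bisectLeftLoop, hx, if_pos hlt]
      by_cases hcmp : xs[(lo + hi) / 2] < x
      · simp only [if_pos hcmp]
        apply ih ((lo + hi) / 2 + 1) hi (by omega) hhl (by omega)
        · intro j hj hjlt
          exact lt_of_le_of_lt (hmono j ((lo+hi)/2) hj hmid (by omega)) hcmp |>.trans_le (le_refl _) |> (fun h => h)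
        · exact hhi
      · simp only [if_neg hcmp]
        apply ih lo ((lo + hi) / 2) (by omega) (by omega) (by omega)
        · exact hlo
        · intro j hj hjge
          exact le_trans (not_lt.mp hcmp) (hmono ((lo+hi)/2) j hmid hj hjge)
    · have : hi = lo := by omega
      subst this
      simp only [PySem.List.bisectLeftLoop, if_neg hlt]
      exact ⟨hlo, hhi⟩

theorem bisect_inv {α : Type} [LinearOrder α] (xs : List α) (x : α)
    (hsort : xs.Pairwise (· ≤ ·)) :
    (∀ j (hj : j < xs.length), j < PySem.List.bisectLeft xs x → xs[j] < x) ∧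
    (∀ j (hj : j < xs.length), PySem.List.bisectLeft xs x ≤ j → x ≤ xs[j]) := by
  have h := bisectLoop_inv xs x hsort xs.length 0 xs.length (Nat.zero_le _) (le_refl _) (by omega)
    (by intro j hj hc; omega) (by intro j hj hc; omega)
  simpa [PySem.List.bisectLeft] using h

theorem queryWalk_eq_filter (kmer : List Char) :
    ∀ (l : List (Lex (List Char × Int))),
    l.Pairwise (fun a b => (ofLex a).1 ≤ (ofLex b).1) →
    (∀ e ∈ l, kmer ≤ (ofLex e).1) →
    queryWalk kmer l = (l.filter (fun e => (ofLex e).1 == kmer)).map (fun e => (ofLex e).2) := by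
  intro l
  induction l with
  | nil => intro _ _; simp [queryWalk]
  | cons e rest ih =>
    intro hp hge
    rcases List.pairwise_cons.mp hp with ⟨he, hrest⟩
    by_cases hek : (ofLex e).1 = kmer
    · have hbe : ((ofLex e).1 == kmer) = true := by simp [hek]
      simp only [queryWalk, hbe, List.filter_cons]
      rw [ih hrest (fun e' he' => hge e' (List.mem_cons_of_mem _ he'))]
      simp
    · have hbe : ((ofLex e).1 == kmer) = false := by simp [hek]
      have hgt : kmer < (ofLex e).1 := lt_of_le_of_ne (hge e (List.mem_cons_self)) (Ne.symm hek)
      have hrestnil : rest.filter (fun e' => (ofLex e').1 == kmer) = [] := by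
        rw [List.filter_eq_nil_iff]
        intro e' he'
        have : kmer < (ofLex e').1 := lt_of_lt_of_le hgt (he e' he')
        simp [ne_of_gt this]
      simp [queryWalk, hbe, hrestnil]

theorem equalRange (l : List (Lex (List Char × Int))) (kmer : List Char)
    (hs : l.Pairwise (· < ·))
    (hnn : ∀ e ∈ l, 0 ≤ (ofLex e).2) :
    queryWalk kmer (l.drop (PySem.List.bisectLeft l (toLex (kmer, -1)))) =
      (l.filter (fun e => (ofLex e).1 == kmer)).map (fun e => (ofLex e).2) := by
  set x0 : Lex (List Char × Int) := toLex (kmer, -1) with hx0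
  have hle : l.Pairwise (· ≤ ·) := hs.imp (fun h => le_of_lt h)
  obtain ⟨hpre, hsuf⟩ := bisect_inv l x0 hle
  set b := PySem.List.bisectLeft l x0 with hb
  have htake : (l.take b).filter (fun e => (ofLex e).1 == kmer) = [] := by
    rw [List.filter_eq_nil_iff]
    intro e he
    obtain ⟨j, hj, rfl⟩ := List.mem_iff_getElem.mp he
    have hjlen := hj
    rw [List.length_take] at hjlen
    have hjl : j < l.length := lt_of_lt_of_le hjlen (min_le_right _ _)
    have hjb : j < b := lt_of_lt_of_le hjlen (min_le_left _ _)
    have hlt := hpre j hjl hjb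
    rw [Prod.Lex.lt_iff] at hlt
    have hgt : (l.take b)[j] = l[j] := List.getElem_take
    rw [hgt]
    rcases hlt with h1 | ⟨h1, h2⟩
    · simp only [hx0, ofLex_toLex] at h1
      simp [ne_of_lt h1]
    · exfalso
      have hc := hnn l[j] (List.getElem_mem hjl)
      simp only [hx0, ofLex_toLex] at h2
      omega
  have hdropge : ∀ e ∈ l.drop b, kmer ≤ (ofLex e).1 := by
    intro e he
    obtain ⟨j, hj, rfl⟩ := List.mem_iff_getElem.mp he
    have hjlen := hj
    rw [List.length_drop] at hjlen
    have hjl : b + j < l.length := by omega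
    have hgt : (l.drop b)[j] = l[b + j] := List.getElem_drop
    rw [hgt]
    have hge := hsuf (b + j) hjl (Nat.le_add_right _ _)
    by_contra hcon
    rw [not_le] at hcon
    have : l[b + j] < x0 := by
      rw [Prod.Lex.lt_iff]; left; simpa [hx0] using hcon
    exact absurd hge (not_le.mpr this)
  have hdrops : (l.drop b).Pairwise (fun a c => (ofLex a).1 ≤ (ofLex c).1) := by
    have hd : (l.drop b).Pairwise (· < ·) := hs.sublist (List.drop_sublist _ _)
    refine hd.imp ?_
    intro a c hac
    rw [Prod.Lex.lt_iff] at hac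
    rcases hac with h | ⟨h, _⟩
    · exact le_of_lt h
    · exact le_of_eq h
  rw [queryWalk_eq_filter kmer _ hdrops hdropge]
  congr 1
  conv_rhs => rw [← List.take_append_drop b l]
  rw [List.filter_append, htake, List.nil_append]

theorem query_eq_scan (tl : List Char) (kmer : List Char) :
    queryWalk kmer ((indexBuild tl 8).drop
        (PySem.List.bisectLeft (indexBuild tl 8) (toLex (kmer, -1)))) =
      ((PySem.List.pyRange 0 ((tl.length : Int) - 7) 1).filter
        (fun w => PySem.List.slice tl (some w) (some (w + 8)) == kmer)).map (fun w => w) := by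
  have hbound : (tl.length : Int) - 8 + 1 = (tl.length : Int) - 7 := by ring
  set f : Int → Lex (List Char × Int) :=
    fun w => toLex (PySem.List.slice tl (some w) (some (w + 8)), w) with hf
  set W := PySem.List.pyRange 0 ((tl.length : Int) - 7) 1 with hW
  have hbuild : indexBuild tl 8 = PySem.List.sorted (W.map f) (fun e => e) false := by
    rw [indexBuild, PySem.List.foldl_append_singleton_eq_map, List.nil_append, hbound]
  set srt := PySem.List.sorted (W.map f) (fun e => e) false with hsrt
  have hperm : srt.Perm (W.map f) := PySem.List.sorted_perm _ _ _
  have hfinj : Function.Injective f := by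
    intro a b h
    have := congrArg (fun e => (ofLex e).2) h
    simpa [hf] using this
  have hnodup : srt.Nodup := hperm.nodup_iff.mpr ((PySem.List.nodup_pyRange_one _ _).map hfinj)
  have hpl : srt.Pairwise (· ≤ ·) := PySem.List.sorted_pairwise (W.map f) (fun e => e)
  have hlt : srt.Pairwise (· < ·) := by
    refine (hpl.and hnodup).imp ?_
    rintro a b ⟨h1, h2⟩
    exact lt_of_le_of_ne h1 h2
  have hnn : ∀ e ∈ srt, 0 ≤ (ofLex e).2 := by
    intro e he
    have : e ∈ W.map f := hperm.mem_iff.mp he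
    obtain ⟨w, hw, rfl⟩ := List.mem_map.mp this
    have := PySem.List.mem_pyRange_one.mp hw
    simp [hf]; omega
  rw [hbuild, equalRange srt kmer hlt hnn]
  have hforig : srt.filter (fun e => (ofLex e).1 == kmer)
      = (W.map f).filter (fun e => (ofLex e).1 == kmer) := by
    have hpermf := hperm.filter (fun e => (ofLex e).1 == kmer)
    have hp1 : (srt.filter (fun e => (ofLex e).1 == kmer)).Pairwise (· < ·) :=
      hlt.sublist (List.filter_sublist)
    have hp2 : ((W.map f).filter (fun e => (ofLex e).1 == kmer)).Pairwise (· < ·) := by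
      rw [List.pairwise_filter, List.pairwise_map]
      refine (PySem.List.pairwise_lt_pyRange_one 0 ((tl.length : Int) - 7)).imp ?_
      intro a b hab ha hb
      rw [Prod.Lex.lt_iff]
      right
      constructor
      · have ha' := beq_iff_eq.mp ha
        have hb' := beq_iff_eq.mp hb
        simp only [hf, ofLex_toLex] at ha' hb' ⊢
        rw [ha', hb']
      · simpa [hf] using hab
    exact hpermf.eq_of_pairwise
      (fun a b _ _ h1 h2 => absurd h2 (asymm h1)) hp1 hp2
  rw [hforig, List.filter_map, List.map_map]
  congr 1

theorem misLoop_cases (pl tl : List Char) (off k : Int) :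
    ∀ (js : List Int) (m : Int),
      misLoop pl tl off k js m
          = m + (js.countP (fun j => !(pGetC pl j == pGetC tl (off + j))) : Int) ∨
      (k < misLoop pl tl off k js m ∧
        misLoop pl tl off k js m
          ≤ m + (js.countP (fun j => !(pGetC pl j == pGetC tl (off + j))) : Int)) := by
  intro js
  induction js with
  | nil => intro m; left; simp [misLoop]
  | cons j rest ih =>
    intro m
    simp only [misLoop, List.countP_cons]
    by_cases hmis : (pGetC pl j == pGetC tl (off + j)) = true
    · rw [if_neg (not_not_intro hmis)]
      have hcnt : (!(pGetC pl j == pGetC tl (off + j))) = false := by simp [hmis]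
      simp only [hcnt, Bool.false_eq_true, if_false, Nat.add_zero]
      exact ih m
    · rw [if_pos hmis]
      have hcnt : (!(pGetC pl j == pGetC tl (off + j))) = true := by simp [hmis]
      simp only [hcnt, if_true]
      by_cases hcap : m + 1 > k
      · rw [if_pos hcap]
        right
        constructor
        · omega
        · push_cast; omega
      · rw [if_neg hcap]
        rcases ih (m + 1) with h | ⟨h1, h2⟩
        · left; rw [h]; push_cast; ring
        · right; constructor
          · exact h1
          · push_cast at h2 ⊢; omega

theorem misLoop_le_iff (pl tl : List Char) (off k : Int) (js : List Int) (m : Int) :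
    misLoop pl tl off k js m ≤ k ↔
      m + (js.countP (fun j => !(pGetC pl j == pGetC tl (off + j))) : Int) ≤ k := by
  rcases misLoop_cases pl tl off k js m with h | ⟨h1, h2⟩
  · rw [h]
  · constructor
    · intro h; omega
    · intro h; omega


theorem indexQuery_eq_scan (tl pseg : List Char) :
    indexQuery (indexBuild tl 8) 8 pseg =
      (PySem.List.pyRange 0 ((tl.length : Int) - 7) 1).filter
        (fun w => PySem.List.slice tl (some w) (some (w + 8)) ==
                  PySem.List.slice pseg none (some 8)) := by
  rw [indexQuery]
  rw [query_eq_scan]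
  simp

theorem scan_fold {σ : Type} (W : List Int) (pred : Int → Bool) (g : σ → Int → σ)
    (body : (Int × σ) → Int → (Int × σ))
    (hbody : ∀ (st : Int × σ) w, pred w = true → body st w = (st.1 + 1, g st.2 w)) :
    ∀ st : Int × σ,
      W.foldl (fun st2 w => if pred w = true then body st2 w else st2) st
        = (st.1 + ((W.filter pred).length : Int), (W.filter pred).foldl g st.2) := by
  induction W with
  | nil => intro st; simp
  | cons w rest ih =>
    intro st
    by_cases hw : pred w = true
    · simp only [List.foldl_cons, List.filter_cons, hw, if_true]
      rw [hbody st w hw, ih]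
      simp only [List.length_cons]
      refine Prod.ext ?_ rfl
      push_cast
      ring
    · simp only [List.foldl_cons, List.filter_cons, hw]
      simp only [Bool.false_eq_true, if_false]
      exact ih st

-- ===== VERDICT =====
theorem approximate_match_index_spec : Claim_equal_approximate_match_index := by
  intro p t k _hDom _hPre
  unfold Spec_approximate_match_index
  unfold approximate_match_index approximate_match_index_alt
  refine congrArg (fun r : Int × PySem.Set Int => (cpySetList r.2, r.1)) ?_
  apply PySem.List.foldl_congr_mem
  intro acc i hi
  dsimp only
  rw [PySem.List.mem_pyRange_one] at hi
  obtain ⟨h0i, hik1⟩ := hi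
  have hkp : (0:Int) < k + 1 := by omega
  have hn0 : (0:Int) ≤ (p.toList.length : Int) := by positivity
  set n : Int := (p.toList.length : Int) with hn
  set T : Int := (t.toList.length : Int) with hT
  set seg : Int := PySem.Int.floordiv n (k + 1) with hseg
  have hseg0 : 0 ≤ seg := by
    rw [hseg, PySem.Int.floordiv_eq_ediv_of_pos hkp]
    exact Int.ediv_nonneg hn0 (le_of_lt hkp)
  have hsegmul : seg * (k + 1) ≤ n := by
    have h1 := PySem.Int.floordiv_mul_add_mod n (k + 1)
    have h2 := PySem.Int.mod_nonneg n hkp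
    rw [← hseg] at h1
    linarith
  have hstart0 : 0 ≤ i * seg := mul_nonneg h0i hseg0
  have hstartn : i * seg ≤ n := by
    have h1 : i * seg ≤ k * seg := mul_le_mul_of_nonneg_right (by omega) hseg0
    have h2 : k * seg = seg * (k + 1) - seg := by ring
    linarith
  rw [add_mul, one_mul]
  rw [indexQuery_eq_scan]
  rw [← hT]
  set start : Int := i * seg with hstart
  set stop : Int := min (start + seg) n with hstop
  have hstartstop : start ≤ stop := le_min (by linarith) hstartn
  have hstopn : stop ≤ n := min_le_right _ _
  simp only [ite_not]
  refine (scan_fold _ _ _ _ ?_ acc).symm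
  intro st w _hw
  dsimp only
  by_cases hb : w - start < 0 ∨ w - start + n > T
  · rw [if_pos hb, if_pos hb]
  · rw [if_neg hb, if_neg hb]
    set off : Int := w - start with hoff
    have hiff :
        ((PySem.List.pyRange 0 n 1).countP
            (fun j => (decide (j < start) || decide (stop ≤ j)) &&
                      !(pGetC p.toList j == pGetC t.toList (off + j))) : Int) ≤ k ↔
        misLoop p.toList t.toList off k (PySem.List.pyRange stop n 1)
            (misLoop p.toList t.toList off k (PySem.List.pyRange 0 start 1) 0) ≤ k := by
      set mism : Int → Bool := fun j => !(pGetC p.toList j == pGetC t.toList (off + j)) with hmism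
      have hsplit1 : PySem.List.pyRange 0 n 1
          = PySem.List.pyRange 0 start 1 ++ PySem.List.pyRange start stop 1
            ++ PySem.List.pyRange stop n 1 := by
        rw [PySem.List.pyRange_one_append 0 start n hstart0 hstartn,
            PySem.List.pyRange_one_append start stop n hstartstop hstopn, List.append_assoc]
      rw [hsplit1, List.countP_append, List.countP_append]
      have hmid : (PySem.List.pyRange start stop 1).countP
          (fun j => (decide (j < start) || decide (stop ≤ j)) && mism j) = 0 := by
        rw [List.countP_eq_zero]
        intro j hj
        rw [PySem.List.mem_pyRange_one] at hj
        simp [not_lt.mpr hj.1, not_le.mpr hj.2]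
      have hleft : (PySem.List.pyRange 0 start 1).countP
          (fun j => (decide (j < start) || decide (stop ≤ j)) && mism j)
          = (PySem.List.pyRange 0 start 1).countP mism := by
        apply List.countP_congr
        intro j hj
        rw [PySem.List.mem_pyRange_one] at hj
        simp [hj.2]
      have hright : (PySem.List.pyRange stop n 1).countP
          (fun j => (decide (j < start) || decide (stop ≤ j)) && mism j)
          = (PySem.List.pyRange stop n 1).countP mism := by
        apply List.countP_congr
        intro j hj
        rw [PySem.List.mem_pyRange_one] at hj
        simp [hj.1]
      rw [hmid, hleft, hright]
      rw [misLoop_le_iff]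
      rw [show (fun j => !(pGetC p.toList j == pGetC t.toList (off + j))) = mism from hmism.symm]
      rcases misLoop_cases p.toList t.toList off k (PySem.List.pyRange 0 start 1) 0
        with hc | ⟨hc1, hc2⟩
      · rw [← hmism] at hc
        rw [hc]
        push_cast
        constructor <;> (intro h; omega)
      · rw [← hmism] at hc2
        push_cast
        constructor <;> (intro h; omega)
    rw [if_congr hiff rfl rfl]
    split_ifs <;> rfl
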